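-- pv_equiv track=rewrite | github.com/natasha/nerus | dev/main.py | order_size
-- ===== SOURCE A (Python) =====
-- from collections import defaultdict
--
-- def order_size(chunk):
--     sizes = defaultdict(list)
--     for index, words in enumerate(chunk):
--         sizes[len(words)].append([index, words])
--
--     order = []
--     groups = []
--     for size in sorted(sizes):
--         group = []
--         for index, words in sizes[size]:
--             order.append(index)
--             group.append(words)
--         groups.append(group)
--     return order, groups
-- ===== SOURCE B (Python) =====
-- def order_size(chunk):
--     order = []
--     groups = []
--     for size in sorted({len(words) for words in chunk}):
--         members = [(i, ws) for i, ws in enumerate(chunk) if len(ws) == size]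
--         order.extend(i for i, _ in members)
--         groups.append([ws for _, ws in members])
--     return order, groups
-- ===== Notes on version B (the rewrite author's own statement) =====
-- stated objective: simpler
-- what changed: Drops the defaultdict index entirely: B sorts the distinct lengths and collects each length-group by filtering the enumerated chunk, relying on enumeration order instead of dict insertion order.
import Mathlib
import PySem

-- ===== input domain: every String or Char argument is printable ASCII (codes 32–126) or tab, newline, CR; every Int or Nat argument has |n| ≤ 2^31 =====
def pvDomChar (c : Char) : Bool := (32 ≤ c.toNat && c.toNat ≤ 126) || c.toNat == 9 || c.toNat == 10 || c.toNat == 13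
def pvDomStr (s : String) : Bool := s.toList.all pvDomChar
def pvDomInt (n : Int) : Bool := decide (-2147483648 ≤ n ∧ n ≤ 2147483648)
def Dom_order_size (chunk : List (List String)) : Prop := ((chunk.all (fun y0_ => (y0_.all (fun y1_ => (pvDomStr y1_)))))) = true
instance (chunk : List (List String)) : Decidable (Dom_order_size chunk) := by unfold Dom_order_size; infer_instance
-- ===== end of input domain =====

-- B replaces A's defaultdict index by one filter pass per distinct length ('simpler': no dict maintained).

-- ===== PORT A =====
def order_size (chunk : List (List String)) : List Int × List (List (List String)) :=
  let sizes := (PySem.List.enumerate chunk).foldl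
    (fun d (p : Int × List String) => d.modify ((p.2.length : Int)) [] (fun l => l ++ [p]))
    PySem.Dict.empty
  (PySem.List.sorted sizes.keys (fun x => x) false).foldl
    (fun (st : List Int × List (List (List String))) size =>
      let inner := (sizes.getD size []).foldl
        (fun (q : List Int × List (List String)) p => (q.1 ++ [p.1], q.2 ++ [p.2])) (st.1, [])
      (inner.1, st.2 ++ [inner.2])) ([], [])

-- ===== PORT B =====
def order_size_alt (chunk : List (List String)) : List Int × List (List (List String)) :=
  (PySem.List.sorted (PySem.Set.ofList (chunk.map (fun ws => (ws.length : Int)))) (fun x => x) false).foldl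
    (fun (st : List Int × List (List (List String))) size =>
      let members := (PySem.List.enumerate chunk).filter (fun p => (p.2.length : Int) == size)
      (st.1 ++ members.map (·.1), st.2 ++ [members.map (·.2)])) ([], [])

-- ===== PRECONDITION & SPEC =====
def Spec_order_size (chunk : List (List String)) (out : List Int × List (List (List String))) : Prop := out = order_size_alt chunk
instance (chunk : List (List String)) (out : List Int × List (List (List String))) : Decidable (Spec_order_size chunk out) := by unfold Spec_order_size; infer_instance

-- ===== CLAIM (what is proved, stated in full; the proofs are below) =====
def Claim_equal_order_size : Prop := ∀ (chunk : List (List String)), Dom_order_size chunk → Spec_order_size chunk (order_size chunk)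

-- ===== LEMMAS AND PROOFS =====

-- A's inner loop over one group appends the indices to order and collects the words.
theorem pv_inner_fold (ms : List (Int × List String)) (acc : List Int) (g : List (List String)) :
    ms.foldl (fun (q : List Int × List (List String)) p => (q.1 ++ [p.1], q.2 ++ [p.2])) (acc, g)
      = (acc ++ ms.map (·.1), g ++ ms.map (·.2)) := by
  induction ms generalizing acc g with
  | nil => simp
  | cons m t ih => simp [List.foldl_cons, ih]

-- The dict A builds: lookup at a size yields exactly the enumerate-filtered pairs of that size.
theorem pv_sizes_getD (chunk : List (List String)) (size : Int) :
    ((PySem.List.enumerate chunk).foldl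
      (fun d (p : Int × List String) => d.modify ((p.2.length : Int)) [] (fun l => l ++ [p]))
      PySem.Dict.empty).getD size []
    = (PySem.List.enumerate chunk).filter (fun p => (p.2.length : Int) == size) := by
  have h : (PySem.List.enumerate chunk).foldl
      (fun d (p : Int × List String) => d.modify ((p.2.length : Int)) [] (fun l => l ++ [p]))
      PySem.Dict.empty
    = ((PySem.List.enumerate chunk).map (fun p => ((p.2.length : Int), p))).foldl
      (fun d q => d.modify q.1 [] (fun l => l ++ [q.2])) PySem.Dict.empty := by
    rw [List.foldl_map]
  rw [h, PySem.Dict.getD_foldl_modify_append]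
  simp [List.filter_map, Function.comp_def]

-- The dict's keys are the distinct lengths, in first-occurrence order.
theorem pv_sizes_keys (chunk : List (List String)) :
    ((PySem.List.enumerate chunk).foldl
      (fun d (p : Int × List String) => d.modify ((p.2.length : Int)) [] (fun l => l ++ [p]))
      PySem.Dict.empty).keys
    = PySem.Set.ofList (chunk.map (fun ws => (ws.length : Int))) := by
  rw [PySem.Dict.keys_foldl_modify_key]
  have h2 : (PySem.List.enumerate chunk).map (fun p => ((p.2.length : Int)))
      = chunk.map (fun ws => (ws.length : Int)) := by
    have h := congrArg (List.map (fun ws => (ws.length : Int))) (PySem.List.map_snd_enumerate chunk 0)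
    rw [List.map_map] at h
    exact h
  rw [h2]
  simp [PySem.Set.update, PySem.Set.ofList_eq_foldl, PySem.Dict.keys_empty]

-- ===== VERDICT (by name: the statement is the Claim_ definition above) =====
theorem order_size_spec : Claim_equal_order_size := by
  intro chunk _
  unfold Spec_order_size order_size order_size_alt
  simp only [pv_sizes_keys, pv_sizes_getD, pv_inner_fold, List.nil_append]
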